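-- pv_equiv track=rewrite | github.com/Mengziyang111/openrank | backend/scripts/sync_repo_data.py | infer_difficulty
-- ===== SOURCE A (Python) =====
-- from typing import List, Optional, Tuple
--
-- def infer_difficulty(labels: List[str]) -> Optional[str]:
--     lower = [l.lower() for l in labels]
--     if any("easy" in l or "beginner" in l for l in lower):
--         return "Easy"
--     if any("medium" in l or "intermediate" in l for l in lower):
--         return "Medium"
--     if any("hard" in l or "advanced" in l for l in lower):
--         return "Hard"
--     return None
-- ===== SOURCE B (Python) =====
-- from typing import List, Optional, Tuple
--
-- def infer_difficulty(labels: List[str]) -> Optional[str]: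
--     categories = [("Easy", ("easy", "beginner")),
--                   ("Medium", ("medium", "intermediate")),
--                   ("Hard", ("hard", "advanced"))]
--     best = len(categories)
--     for label in labels:
--         l = label.lower()
--         for i, (_, kws) in enumerate(categories):
--             if i < best and any(k in l for k in kws):
--                 best = i
--                 break
--     return categories[best][0] if best < len(categories) else None
-- ===== Notes on version B (the rewrite author's own statement) =====
-- stated objective: alternative
-- what changed: A makes three fixed-order any() passes over the lowered label list; B builds a priority-ordered category table and makes one pass over the labels, keeping a running minimum priority index, then maps the final index back to a category name.
import Mathlib
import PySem

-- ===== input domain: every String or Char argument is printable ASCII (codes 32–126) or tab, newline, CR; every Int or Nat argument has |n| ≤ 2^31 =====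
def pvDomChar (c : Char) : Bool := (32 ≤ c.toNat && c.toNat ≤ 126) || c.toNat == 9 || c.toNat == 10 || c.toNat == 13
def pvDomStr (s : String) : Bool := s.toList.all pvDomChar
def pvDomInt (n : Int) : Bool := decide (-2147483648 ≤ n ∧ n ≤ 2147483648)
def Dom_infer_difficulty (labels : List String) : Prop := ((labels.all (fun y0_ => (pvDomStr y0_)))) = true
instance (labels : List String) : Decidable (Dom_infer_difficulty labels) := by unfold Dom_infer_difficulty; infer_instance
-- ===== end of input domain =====

-- B changes the decomposition: instead of A's three fixed any()-passes over the lowered labels,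
-- B makes ONE pass over the labels keeping a running minimum priority index over a category table.

-- ===== PORT A =====
def infer_difficulty (labels : List String) : Option String :=
  let lower := labels.map PySem.Str.lower
  if lower.any (fun l => PySem.Str.isIn "easy" l || PySem.Str.isIn "beginner" l) then some "Easy"
  else if lower.any (fun l => PySem.Str.isIn "medium" l || PySem.Str.isIn "intermediate" l) then some "Medium"
  else if lower.any (fun l => PySem.Str.isIn "hard" l || PySem.Str.isIn "advanced" l) then some "Hard"
  else none

-- ===== PORT B =====
def pvCategories : List (String × List String) :=
  [("Easy", ["easy", "beginner"]), ("Medium", ["medium", "intermediate"]), ("Hard", ["hard", "advanced"])]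

-- inner loop of B: 'for i, (_, kws) in enumerate(categories): if i < best and any(...): best = i; break'
def pvScan (l : String) (best : Int) : List (Int × String × List String) → Int
  | [] => best
  | (i, _, kws) :: rest =>
      if i < best && kws.any (fun k => PySem.Str.isIn k l) then i
      else pvScan l best rest

def infer_difficulty_alt (labels : List String) : Option String :=
  let best := labels.foldl
    (fun best label => pvScan (PySem.Str.lower label) best (PySem.List.enumerate pvCategories))
    (pvCategories.length : Int)
  if best < (pvCategories.length : Int) then (PySem.List.pyGet? pvCategories best).map Prod.fst
  else none

-- ===== PRECONDITION & SPEC =====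
def Spec_infer_difficulty (labels : List String) (out : Option String) : Prop := out = infer_difficulty_alt labels
instance (labels : List String) (out : Option String) : Decidable (Spec_infer_difficulty labels out) := by unfold Spec_infer_difficulty; infer_instance

-- ===== CLAIM (what is proved, stated in full; the proofs are below) =====
def Claim_equal_infer_difficulty : Prop := ∀ (labels : List String), Dom_infer_difficulty labels → Spec_infer_difficulty labels (infer_difficulty labels)

-- ===== LEMMAS AND PROOFS =====

-- priority index of a single (already lowered) label
def pvIdx (l : String) : Int :=
  if PySem.Str.isIn "easy" l || PySem.Str.isIn "beginner" l then 0
  else if PySem.Str.isIn "medium" l || PySem.Str.isIn "intermediate" l then 1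
  else if PySem.Str.isIn "hard" l || PySem.Str.isIn "advanced" l then 2
  else 3

-- best index over a label list, in A's check order
def pvH (ls : List String) : Int :=
  if ls.any (fun l => PySem.Str.isIn "easy" (PySem.Str.lower l) || PySem.Str.isIn "beginner" (PySem.Str.lower l)) then 0
  else if ls.any (fun l => PySem.Str.isIn "medium" (PySem.Str.lower l) || PySem.Str.isIn "intermediate" (PySem.Str.lower l)) then 1
  else if ls.any (fun l => PySem.Str.isIn "hard" (PySem.Str.lower l) || PySem.Str.isIn "advanced" (PySem.Str.lower l)) then 2
  else 3

theorem pvIdx_le (l : String) : pvIdx l ≤ 3 := by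
  unfold pvIdx; split_ifs <;> omega

theorem pvScan_eq (l : String) (b : Int) (hb : b ≤ 3) :
    pvScan l b (PySem.List.enumerate pvCategories) = min b (pvIdx l) := by
  simp only [pvCategories, PySem.List.enumerate_cons, PySem.List.enumerate_nil, pvScan,
    List.any_cons, List.any_nil, pvIdx, Bool.or_false]
  rcases h0 : (PySem.Str.isIn "easy" l || PySem.Str.isIn "beginner" l) with _|_ <;>
  rcases h1 : (PySem.Str.isIn "medium" l || PySem.Str.isIn "intermediate" l) with _|_ <;>
  rcases h2 : (PySem.Str.isIn "hard" l || PySem.Str.isIn "advanced" l) with _|_ <;>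
    simp [h0, h1, h2] <;> (try split_ifs) <;> omega

theorem pvKey (b : Int) (e0 e1 e2 a0 a1 a2 : Bool) :
    min (min b (if e0 = true then 0 else if e1 = true then 1 else if e2 = true then 2 else 3))
        (if a0 = true then (0:Int) else if a1 = true then 1 else if a2 = true then 2 else 3)
      = min b (if (e0 || a0) = true then 0 else if (e1 || a1) = true then 1 else if (e2 || a2) = true then 2 else 3) := by
  cases e0 <;> cases e1 <;> cases e2 <;> cases a0 <;> cases a1 <;> cases a2 <;> simp

theorem pvFold_eq (ls : List String) (b : Int) (hb : b ≤ 3) :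
    ls.foldl (fun best label => pvScan (PySem.Str.lower label) best (PySem.List.enumerate pvCategories)) b
      = min b (pvH ls) := by
  induction ls generalizing b with
  | nil => simp [pvH]; omega
  | cons l ls ih =>
    rw [List.foldl_cons, pvScan_eq _ _ hb, ih _ (le_trans (min_le_right _ _) (pvIdx_le _))]
    unfold pvH pvIdx
    simp only [List.any_cons]
    exact pvKey b _ _ _ _ _ _

theorem pvH_le (ls : List String) : pvH ls ≤ 3 := by
  unfold pvH; split_ifs <;> omega

theorem infer_difficulty_spec : Claim_equal_infer_difficulty := by
  intro labels _
  unfold Spec_infer_difficulty infer_difficulty infer_difficulty_alt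
  rw [show ((pvCategories.length : Nat) : Int) = 3 from by norm_num [pvCategories],
      pvFold_eq _ _ (by norm_num), min_eq_right (pvH_le labels)]
  unfold pvH
  simp only [List.any_map, Function.comp_def]
  rcases a0 : (labels.any fun x => PySem.Str.isIn "easy" (PySem.Str.lower x) || PySem.Str.isIn "beginner" (PySem.Str.lower x)) with _|_ <;>
  rcases a1 : (labels.any fun x => PySem.Str.isIn "medium" (PySem.Str.lower x) || PySem.Str.isIn "intermediate" (PySem.Str.lower x)) with _|_ <;>
  rcases a2 : (labels.any fun x => PySem.Str.isIn "hard" (PySem.Str.lower x) || PySem.Str.isIn "advanced" (PySem.Str.lower x)) with _|_ <;>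
    simp [a0, a1, a2, pvCategories, PySem.List.pyGet?, PySem.List.pyIdx?]
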